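-- pv_equiv track=rewrite | github.com/InitialH14/S-Box-Analysis-Tools | GUI-Kripto.py | calculate_bic_nl
-- ===== SOURCE A (Python) =====
-- def hamming_weight(n):
--     return bin(n).count('1')
--
-- def calculate_bic_nl(sbox):
--     N = len(sbox)
--     max_correlation = 0
--     for a in range(1, N):
--         for b in range(N):
--             correlation = 0
--             for x in range(N):
--                 wx = hamming_weight(x & a) % 2
--                 fx = hamming_weight(sbox[x % len(sbox)] & b) % 2
--                 correlation += (-1) ** (wx ^ fx)
--             max_correlation = max(max_correlation, abs(correlation))
--     return max(0, 128 - max_correlation // 2)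
-- ===== SOURCE B (Python) =====
-- def _fwht(t):
--     # recursive Walsh-Hadamard transform on a list whose length is a power of two
--     if len(t) <= 1:
--         return t
--     half = len(t) // 2
--     lo, hi = t[:half], t[half:]
--     return _fwht([x + y for x, y in zip(lo, hi)]) + _fwht([x - y for x, y in zip(lo, hi)])
--
-- def calculate_bic_nl(sbox):
--     N = len(sbox)
--     M = 1 << ((N - 1).bit_length() if N > 1 else 0)
--     rows = []
--     for b in range(N):
--         t = [1 - 2 * (bin(v & b).count("1") % 2) for v in sbox]
--         rows.append(_fwht(t + [0] * (M - N)))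
--     best = 0
--     for a in range(1, N):
--         for b in range(N):
--             best = max(best, abs(rows[b][a]))
--     return max(0, 128 - best // 2)
-- ===== Notes on version B (the rewrite author's own statement) =====
-- stated objective: faster
-- what changed: Replaces the cubic brute-force loop over (a,b,x) by a fast Walsh-Hadamard transform per output mask b on the zero-padded sign table, so all input-mask correlations for a fixed b are obtained in O(M log M) instead of O(N^2 log N).
import Mathlib
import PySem

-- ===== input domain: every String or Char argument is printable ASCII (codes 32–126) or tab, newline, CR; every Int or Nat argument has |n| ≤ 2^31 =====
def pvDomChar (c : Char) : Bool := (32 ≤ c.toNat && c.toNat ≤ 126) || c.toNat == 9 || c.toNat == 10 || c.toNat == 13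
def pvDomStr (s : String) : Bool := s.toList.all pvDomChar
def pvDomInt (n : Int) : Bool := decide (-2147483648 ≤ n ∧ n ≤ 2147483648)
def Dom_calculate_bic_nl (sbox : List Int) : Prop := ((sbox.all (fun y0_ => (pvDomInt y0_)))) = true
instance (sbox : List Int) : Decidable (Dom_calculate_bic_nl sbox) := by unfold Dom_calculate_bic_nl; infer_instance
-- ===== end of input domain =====

-- B computes the same BIC nonlinearity with a fast Walsh-Hadamard transform per output mask
-- (objective: faster; a timing run measures the speed-up).


-- ===== PORT A =====
-- bin(n).count('1'): PySem.Int.bitCount is Python-exact (reads |n|)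
def hamming_weight (n : Int) : Int := (PySem.Int.bitCount n : Int)

def calculate_bic_nl (sbox : List Int) : Int :=
  let N : Int := (sbox.length : Int)
  let max_correlation :=
    (PySem.List.pyRange 1 N 1).foldl (fun mc a =>
      (PySem.List.pyRange 0 N 1).foldl (fun mc b =>
        let correlation :=
          (PySem.List.pyRange 0 N 1).foldl (fun c x =>
            let wx := PySem.Int.mod (hamming_weight (PySem.Int.band x a)) 2
            -- sbox[x % len(sbox)]: the index is always in range here, so pyGetD 0 is exact
            let fx := PySem.Int.mod
              (hamming_weight (PySem.Int.band (PySem.List.pyGetD sbox (PySem.Int.mod x N) 0) b)) 2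
            -- (-1) ** (wx ^ fx): the exponent is 0 or 1, so .toNat is exact
            c + (-1 : Int) ^ (PySem.Int.bxor wx fx).toNat) 0
        max mc |correlation|) mc) 0
  max 0 (128 - PySem.Int.floordiv max_correlation 2)

-- ===== PORT B =====
-- recursive Walsh-Hadamard transform (Source B's _fwht; lo = take half, hi = drop half)
def fwht (t : List Int) : List Int :=
  if t.length ≤ 1 then t
  else
    fwht (List.zipWith (· + ·) (t.take (t.length / 2)) (t.drop (t.length / 2))) ++
    fwht (List.zipWith (· - ·) (t.take (t.length / 2)) (t.drop (t.length / 2)))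
termination_by t.length
decreasing_by
  all_goals simp_all [List.length_zipWith]; omega

def calculate_bic_nl_alt (sbox : List Int) : Int :=
  let N := sbox.length
  let M := 2 ^ (if 1 < N then PySem.Int.bitLength ((N : Int) - 1) else 0)
  let rows := (List.range N).map (fun (b : Nat) =>
    fwht ((sbox.map (fun v =>
      (1 : Int) - 2 * ((PySem.Int.bitCount (PySem.Int.band v (b : Int)) % 2 : Nat) : Int)))
      ++ List.replicate (M - N) 0))
  let best := (List.range' 1 (N - 1)).foldl (fun best a =>
    (List.range N).foldl (fun best b =>
      max best |((rows.getD b []).getD a 0)|) best) 0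
  max 0 (128 - PySem.Int.floordiv best 2)

-- ===== PRECONDITION & SPEC =====
def Spec_calculate_bic_nl (sbox : List Int) (out : Int) : Prop := out = calculate_bic_nl_alt sbox
instance (sbox : List Int) (out : Int) : Decidable (Spec_calculate_bic_nl sbox out) := by unfold Spec_calculate_bic_nl; infer_instance

-- ===== CLAIM (what is proved, stated in full; the proofs are below) =====
def Claim_equal_calculate_bic_nl : Prop := ∀ (sbox : List Int), Dom_calculate_bic_nl sbox → Spec_calculate_bic_nl sbox (calculate_bic_nl sbox)

-- ===== LEMMAS AND PROOFS =====

-- popcount of a natural number, via the Python-exact bit count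
def pcN (n : Nat) : Nat := PySem.Int.bitCount (n : Int)

-- Walsh character: (-1)^popcount(x AND a)
def sg (a x : Nat) : Int := (-1 : Int) ^ pcN (x &&& a)

-- the per-entry sign B tabulates for output mask b
def gfun (b v : Int) : Int := (1 : Int) - 2 * ((PySem.Int.bitCount (PySem.Int.band v b) % 2 : Nat) : Int)

-- the Walsh correlation sum both programs compute
def wsum (a n : Nat) (t : List Int) : Int :=
  ((List.range n).map (fun x => sg a x * t.getD x 0)).sum

-- common reference form of both programs
def ref (sbox : List Int) : Int :=
  max 0 (128 - PySem.Int.floordiv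
    ((List.range (sbox.length - 1)).foldl (fun mc (j : Nat) =>
      (List.range sbox.length).foldl (fun mc (b : Nat) =>
        max mc |wsum (1 + j) sbox.length (sbox.map (gfun (b : Int)))|) mc) 0) 2)

lemma pcN_step (m : Nat) : pcN m = m % 2 + pcN (m / 2) := by
  rcases Nat.eq_zero_or_pos m with h | h
  · subst h; simp [pcN, PySem.Int.bitCount_zero]
  · exact PySem.Int.bitCount_natCast h

lemma pcN_two_pow_add (k : Nat) : ∀ m : Nat, m < 2 ^ k → pcN (2 ^ k + m) = pcN m + 1 := by
  induction k with
  | zero =>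
    intro m hm
    have : m = 0 := by omega
    subst this
    decide
  | succ k ih =>
    intro m hm
    have e2 : (2:Nat) ^ (k + 1) = 2 ^ k + 2 ^ k := by ring
    have h1 : (2 ^ (k + 1) + m) % 2 = m % 2 := by omega
    have h2 : (2 ^ (k + 1) + m) / 2 = 2 ^ k + m / 2 := by omega
    rw [pcN_step (2 ^ (k + 1) + m), h1, h2, ih (m / 2) (by omega), pcN_step m]
    omega

lemma land_high_left (k x a : Nat) (ha : a < 2 ^ k) : (2 ^ k + x) &&& a = x &&& a := by
  apply Nat.eq_of_testBit_eq
  intro i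
  rcases lt_or_ge i k with h | h
  · simp [Nat.testBit_two_pow_add_gt h]
  · have hz : a.testBit i = false :=
      Nat.testBit_lt_two_pow (lt_of_lt_of_le ha (Nat.pow_le_pow_right (by norm_num) h))
    simp [hz]

lemma land_high_right (k x a : Nat) (hx : x < 2 ^ k) : x &&& (2 ^ k + a) = x &&& a := by
  rw [Nat.land_comm, land_high_left k a x hx, Nat.land_comm]

lemma land_high_both (k x a : Nat) (hx : x < 2 ^ k) (ha : a < 2 ^ k) :
    (2 ^ k + x) &&& (2 ^ k + a) = 2 ^ k + (x &&& a) := by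
  have hand : x &&& a < 2 ^ k := Nat.and_lt_two_pow x ha
  apply Nat.eq_of_testBit_eq
  intro i
  rcases lt_trichotomy i k with h | h | h
  · rw [Nat.testBit_land, Nat.testBit_two_pow_add_gt h, Nat.testBit_two_pow_add_gt h,
        Nat.testBit_two_pow_add_gt h, ← Nat.testBit_land]
  · subst h
    simp [Nat.testBit_two_pow_add_eq, Nat.testBit_lt_two_pow hx,
      Nat.testBit_lt_two_pow ha, Nat.testBit_lt_two_pow hand]
  · have b1 : 2 ^ k + x < 2 ^ i := by
      calc 2 ^ k + x < 2 ^ k + 2 ^ k := by omega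
      _ = 2 ^ (k + 1) := by ring
      _ ≤ 2 ^ i := Nat.pow_le_pow_right (by norm_num) (by omega)
    have b2 : 2 ^ k + a < 2 ^ i := by
      calc 2 ^ k + a < 2 ^ k + 2 ^ k := by omega
      _ = 2 ^ (k + 1) := by ring
      _ ≤ 2 ^ i := Nat.pow_le_pow_right (by norm_num) (by omega)
    have b3 : 2 ^ k + (x &&& a) < 2 ^ i := by
      calc 2 ^ k + (x &&& a) < 2 ^ k + 2 ^ k := by omega
      _ = 2 ^ (k + 1) := by ring
      _ ≤ 2 ^ i := Nat.pow_le_pow_right (by norm_num) (by omega)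
    rw [Nat.testBit_land, Nat.testBit_lt_two_pow b1, Nat.testBit_lt_two_pow b3]
    rfl

lemma sg_right_high (k a x : Nat) (ha : a < 2 ^ k) : sg a (2 ^ k + x) = sg a x := by
  unfold sg
  rw [land_high_left k x a ha]

lemma sg_left_high (k a x : Nat) (hx : x < 2 ^ k) : sg (2 ^ k + a) x = sg a x := by
  unfold sg
  rw [land_high_right k x a hx]

lemma sg_both_high (k a x : Nat) (hx : x < 2 ^ k) (ha : a < 2 ^ k) :
    sg (2 ^ k + a) (2 ^ k + x) = -sg a x := by
  unfold sg
  rw [land_high_both k x a hx ha, pcN_two_pow_add k (x &&& a) (Nat.and_lt_two_pow x ha),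
      pow_succ]
  ring

lemma fwht_length_pow (k : Nat) : ∀ t : List Int, t.length = 2 ^ k → (fwht t).length = 2 ^ k := by
  induction k with
  | zero =>
    intro t ht
    rw [fwht, if_pos (by omega)]
    exact ht
  | succ k ih =>
    intro t ht
    have e2 : (2:Nat) ^ (k + 1) = 2 ^ k + 2 ^ k := by ring
    have hpos : 0 < (2:Nat) ^ k := Nat.two_pow_pos k
    have hhalf : t.length / 2 = 2 ^ k := by rw [ht, e2]; omega
    rw [fwht, if_neg (by rw [ht, e2]; omega), hhalf, List.length_append,
      ih _ (by simp only [List.length_zipWith, List.length_take, List.length_drop]; omega),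
      ih _ (by simp only [List.length_zipWith, List.length_take, List.length_drop]; omega)]
    omega

lemma zip_halves_getD (f : Int → Int → Int) (t : List Int) (half x : Nat)
    (hlen : t.length = 2 * half) (hx : x < half) :
    (List.zipWith f (t.take half) (t.drop half)).getD x 0
      = f (t.getD x 0) (t.getD (half + x) 0) := by
  have hz : x < (List.zipWith f (t.take half) (t.drop half)).length := by
    simp only [List.length_zipWith, List.length_take, List.length_drop]
    omega
  rw [List.getD_eq_getElem _ _ hz, List.getElem_zipWith,
      List.getD_eq_getElem t _ (show x < t.length by omega),
      List.getD_eq_getElem t _ (show half + x < t.length by omega)]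
  simp [List.getElem_take, List.getElem_drop]

lemma sum_map_add (l : List Nat) (f g : Nat → Int) :
    (l.map (fun x => f x + g x)).sum = (l.map f).sum + (l.map g).sum := by
  induction l with
  | nil => simp
  | cons h t ih => simp [ih]; ring

lemma fwht_getD (k : Nat) : ∀ (t : List Int), t.length = 2 ^ k →
    ∀ a : Nat, a < 2 ^ k → (fwht t).getD a 0 = wsum a (2 ^ k) t := by
  induction k with
  | zero =>
    intro t ht a ha
    have ha0 : a = 0 := by omega
    subst ha0
    rw [fwht, if_pos (by omega)]
    simp [wsum, sg, pcN, PySem.Int.bitCount_zero]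
  | succ k ih =>
    intro t ht a ha
    have e2 : (2:Nat) ^ (k + 1) = 2 ^ k + 2 ^ k := by ring
    have hpos : 0 < (2:Nat) ^ k := Nat.two_pow_pos k
    have hhalf : t.length / 2 = 2 ^ k := by rw [ht, e2]; omega
    rw [fwht, if_neg (by rw [ht, e2]; omega), hhalf]
    set u := List.zipWith (· + ·) (t.take (2 ^ k)) (t.drop (2 ^ k)) with hu
    set w := List.zipWith (· - ·) (t.take (2 ^ k)) (t.drop (2 ^ k)) with hw
    have hul : u.length = 2 ^ k := by
      rw [hu]
      simp only [List.length_zipWith, List.length_take, List.length_drop]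
      omega
    have hwl : w.length = 2 ^ k := by
      rw [hw]
      simp only [List.length_zipWith, List.length_take, List.length_drop]
      omega
    have hfl : (fwht u).length = 2 ^ k := fwht_length_pow k u hul
    have hlen2 : t.length = 2 * 2 ^ k := by rw [ht]; ring
    have hu2 : ∀ x, x < 2 ^ k → u.getD x 0 = t.getD x 0 + t.getD (2 ^ k + x) 0 :=
      fun x hx => zip_halves_getD _ t _ x hlen2 hx
    have hw2 : ∀ x, x < 2 ^ k → w.getD x 0 = t.getD x 0 - t.getD (2 ^ k + x) 0 :=
      fun x hx => zip_halves_getD _ t _ x hlen2 hx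
    rcases lt_or_ge a (2 ^ k) with hlo | hhi
    · rw [List.getD_append _ _ _ _ (by rw [hfl]; exact hlo), ih u hul a hlo]
      unfold wsum
      rw [e2, List.range_add, List.map_append, List.sum_append, List.map_map]
      have l1 : (List.range (2 ^ k)).map (fun x => sg a x * u.getD x 0)
          = (List.range (2 ^ k)).map
              (fun x => sg a x * t.getD x 0 + sg a x * t.getD (2 ^ k + x) 0) := by
        apply List.map_congr_left
        intro x hx
        rw [hu2 x (List.mem_range.mp hx)]
        ring
      have l2 : (List.range (2 ^ k)).map ((fun x => sg a x * t.getD x 0) ∘ (fun x => 2 ^ k + x))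
          = (List.range (2 ^ k)).map (fun x => sg a x * t.getD (2 ^ k + x) 0) := by
        apply List.map_congr_left
        intro x hx
        simp only [Function.comp_apply]
        rw [sg_right_high k a x hlo]
      rw [l1, l2, sum_map_add]
    · have ha' : a - 2 ^ k < 2 ^ k := by omega
      rw [List.getD_append_right _ _ _ _ (by rw [hfl]; omega), hfl,
          ih w hwl (a - 2 ^ k) ha']
      unfold wsum
      rw [e2, List.range_add, List.map_append, List.sum_append, List.map_map]
      have hae : a = 2 ^ k + (a - 2 ^ k) := by omega
      have l1 : (List.range (2 ^ k)).map (fun x => sg (a - 2 ^ k) x * w.getD x 0)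
          = (List.range (2 ^ k)).map
              (fun x => sg (a - 2 ^ k) x * t.getD x 0 + (-sg (a - 2 ^ k) x) * t.getD (2 ^ k + x) 0) := by
        apply List.map_congr_left
        intro x hx
        rw [hw2 x (List.mem_range.mp hx)]
        ring
      have l2 : (List.range (2 ^ k)).map (fun x => sg a x * t.getD x 0)
          = (List.range (2 ^ k)).map (fun x => sg (a - 2 ^ k) x * t.getD x 0) := by
        apply List.map_congr_left
        intro x hx
        have h5 := sg_left_high k (a - 2 ^ k) x (List.mem_range.mp hx)
        rw [← hae] at h5
        rw [h5]
      have l3 : (List.range (2 ^ k)).map ((fun x => sg a x * t.getD x 0) ∘ (fun x => 2 ^ k + x))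
          = (List.range (2 ^ k)).map (fun x => (-sg (a - 2 ^ k) x) * t.getD (2 ^ k + x) 0) := by
        apply List.map_congr_left
        intro x hx
        simp only [Function.comp_apply]
        have h6 := sg_both_high k (a - 2 ^ k) x (List.mem_range.mp hx) ha'
        rw [← hae] at h6
        rw [h6]
      rw [l1, l2, l3, sum_map_add]

lemma wsum_pad (a n p : Nat) (t : List Int) (ht : t.length = n) :
    wsum a (n + p) (t ++ List.replicate p 0) = wsum a n t := by
  unfold wsum
  rw [List.range_add, List.map_append, List.sum_append, List.map_map]
  have l1 : (List.range n).map (fun x => sg a x * (t ++ List.replicate p 0).getD x 0)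
      = (List.range n).map (fun x => sg a x * t.getD x 0) := by
    apply List.map_congr_left
    intro x hx
    rw [List.getD_append _ _ _ _ (show x < t.length by rw [ht]; exact List.mem_range.mp hx)]
  have l2 : (List.range p).map ((fun x => sg a x * (t ++ List.replicate p 0).getD x 0) ∘ (fun x => n + x))
      = (List.range p).map (fun _ => (0 : Int)) := by
    apply List.map_congr_left
    intro x hx
    simp only [Function.comp_apply]
    rw [List.getD_append_right _ _ _ _ (by omega), ht]
    have : n + x - n = x := by omega
    rw [this, List.getD_replicate _ (List.mem_range.mp hx)]
    ring
  rw [l1, l2]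
  simp

lemma termA_eq (v : Int) (x a b : Nat) :
    (-1 : Int) ^ (PySem.Int.bxor (PySem.Int.mod (hamming_weight (PySem.Int.band (x : Int) (a : Int))) 2)
        (PySem.Int.mod (hamming_weight (PySem.Int.band v (b : Int))) 2)).toNat
      = sg a x * gfun (b : Int) v := by
  unfold hamming_weight sg gfun pcN
  rw [PySem.Int.band_natCast]
  set p := PySem.Int.bitCount ((x &&& a : Nat) : Int) with hp
  set q := PySem.Int.bitCount (PySem.Int.band v (b : Int)) with hq
  have e1 : PySem.Int.mod (p : Int) 2 = ((p % 2 : Nat) : Int) := by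
    rw [PySem.Int.mod_eq_emod_of_pos (by norm_num)]
    omega
  have e2 : PySem.Int.mod (q : Int) 2 = ((q % 2 : Nat) : Int) := by
    rw [PySem.Int.mod_eq_emod_of_pos (by norm_num)]
    omega
  rw [e1, e2, PySem.Int.bxor_natCast, Int.toNat_natCast]
  rcases Nat.mod_two_eq_zero_or_one p with hp2 | hp2 <;>
    rcases Nat.mod_two_eq_zero_or_one q with hq2 | hq2 <;>
    rw [hp2, hq2]
  · rw [(Nat.even_iff.mpr hp2).neg_one_pow]
    norm_num
  · rw [(Nat.even_iff.mpr hp2).neg_one_pow]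
    norm_num
  · rw [(Nat.odd_iff.mpr hp2).neg_one_pow]
    norm_num
  · rw [(Nat.odd_iff.mpr hp2).neg_one_pow]
    norm_num

lemma inner_eq (sbox : List Int) (a b : Nat) :
    ((List.range sbox.length).map (fun (k : Nat) => (k : Int))).foldl (fun c x =>
      c + (-1 : Int) ^ (PySem.Int.bxor
            (PySem.Int.mod (hamming_weight (PySem.Int.band x (a : Int))) 2)
            (PySem.Int.mod (hamming_weight (PySem.Int.band
              (PySem.List.pyGetD sbox (PySem.Int.mod x (sbox.length : Int)) 0) (b : Int))) 2)).toNat) 0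
      = wsum a sbox.length (sbox.map (gfun (b : Int))) := by
  simp only [List.foldl_map]
  rw [PySem.List.foldl_add, zero_add]
  unfold wsum
  congr 1
  apply List.map_congr_left
  intro x hx
  have hxN : x < sbox.length := List.mem_range.mp hx
  have e1 : PySem.Int.mod (x : Int) (sbox.length : Int) = ((x % sbox.length : Nat) : Int) :=
    PySem.Int.mod_natCast x sbox.length
  rw [e1, Nat.mod_eq_of_lt hxN, PySem.List.pyGetD_natCast,
      List.getD_eq_getElem sbox _ hxN,
      List.getD_eq_getElem _ _ (show x < (sbox.map (gfun (b : Int))).length by simpa using hxN),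
      List.getElem_map]
  exact termA_eq sbox[x] x a b

lemma A_eq_ref (sbox : List Int) : calculate_bic_nl sbox = ref sbox := by
  have hN : ((sbox.length : Int) - 1).toNat = sbox.length - 1 := by omega
  simp only [calculate_bic_nl, ref, PySem.List.pyRange_one, sub_zero, Int.toNat_natCast, hN,
    zero_add]
  refine congrArg (fun z => max 0 (128 - PySem.Int.floordiv z 2)) ?_
  rw [List.foldl_map]
  refine PySem.List.foldl_congr_mem _ _ _ _ ?_
  intro acc j _
  try simp only []
  rw [List.foldl_map]
  refine PySem.List.foldl_congr_mem _ _ _ _ ?_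
  intro acc2 b _
  try simp only []
  simp only [show ((1 : Int) + (j : Int)) = ((1 + j : Nat) : Int) from by push_cast; ring]
  rw [inner_eq sbox (1 + j) b]

lemma row_val (sbox : List Int) (b a : Nat) (hb : b < sbox.length) (ha : a < sbox.length) :
    ((((List.range sbox.length).map (fun (b : Nat) =>
        fwht ((sbox.map (fun v =>
          (1 : Int) - 2 * ((PySem.Int.bitCount (PySem.Int.band v (b : Int)) % 2 : Nat) : Int)))
          ++ List.replicate
            (2 ^ (if 1 < sbox.length then PySem.Int.bitLength ((sbox.length : Int) - 1) else 0)
              - sbox.length) 0))).getD b []).getD a 0)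
      = wsum a sbox.length (sbox.map (gfun (b : Int))) := by
  set N := sbox.length with hNdef
  set K := if 1 < N then PySem.Int.bitLength ((N : Int) - 1) else 0 with hK
  have hNM : N ≤ 2 ^ K := by
    by_cases h1 : 1 < N
    · rw [hK, if_pos h1]
      have hlt := PySem.Int.lt_two_pow_bitLength ((N : Int) - 1)
      have habs : ((N : Int) - 1).natAbs = N - 1 := by omega
      rw [habs] at hlt
      omega
    · rw [hK, if_neg h1, pow_zero]
      omega
  have hrow : ((List.range N).map (fun (b : Nat) =>
      fwht ((sbox.map (fun v =>
        (1 : Int) - 2 * ((PySem.Int.bitCount (PySem.Int.band v (b : Int)) % 2 : Nat) : Int)))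
        ++ List.replicate (2 ^ K - N) 0))).getD b []
      = fwht ((sbox.map (gfun (b : Int))) ++ List.replicate (2 ^ K - N) 0) := by
    rw [List.getD_eq_getElem _ _ (by simpa using hb), List.getElem_map, List.getElem_range]
    rfl
  rw [hrow]
  clear hrow
  have hlen : ((sbox.map (gfun (b : Int))) ++ List.replicate (2 ^ K - N) 0).length = 2 ^ K := by
    simp only [List.length_append, List.length_map, List.length_replicate]
    omega
  rw [fwht_getD K _ hlen a (by omega)]
  have he : (2 : Nat) ^ K = N + (2 ^ K - N) := by omega
  set L := sbox.map (gfun (b : Int)) ++ List.replicate (2 ^ K - N) 0 with hL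
  rw [he, hL]
  exact wsum_pad a N (2 ^ K - N) _ (by simp [hNdef])

lemma B_eq_ref (sbox : List Int) : calculate_bic_nl_alt sbox = ref sbox := by
  simp only [calculate_bic_nl_alt, ref, List.range'_eq_map_range]
  refine congrArg (fun z => max 0 (128 - PySem.Int.floordiv z 2)) ?_
  rw [List.foldl_map]
  refine PySem.List.foldl_congr_mem _ _ _ _ ?_
  intro acc j hj
  try simp only []
  refine PySem.List.foldl_congr_mem _ _ _ _ ?_
  intro acc2 b hb
  try simp only []
  rw [row_val sbox b (1 + j) (List.mem_range.mp hb) (by have := List.mem_range.mp hj; omega)]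

lemma calculate_bic_nl_equal (sbox : List Int) : calculate_bic_nl sbox = calculate_bic_nl_alt sbox :=
  (A_eq_ref sbox).trans (B_eq_ref sbox).symm

-- ===== VERDICT (by name: the statement is the Claim_ definition above) =====
theorem calculate_bic_nl_spec : Claim_equal_calculate_bic_nl := by
  intro sbox _
  show calculate_bic_nl sbox = calculate_bic_nl_alt sbox
  exact calculate_bic_nl_equal sbox
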